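-- pv_equiv track=rewrite | github.com/NoobDip/code2video | utils/explainer.py | _remove_markdown
-- ===== SOURCE A (Python) =====
-- def _remove_markdown(text):
--     lines = []
--     for line in text.split('\n'):
--         if line.strip().startswith('#'):
--             lines.append(line.lstrip('#').strip())
--         else:
--             lines.append(line)
--
--     text = '\n'.join(lines)
--     text = text.replace('**', '').replace('*', '')
--     text = text.replace('__', '').replace('_', '')
--     text = text.replace('`', '')
--
--     lines = []
--     for line in text.split('\n'):
--         if line.strip() and line[0].isdigit() and '. ' in line:
--             line = line.replace('. ', ') ', 1)
--         lines.append(line)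
--
--     return '\n'.join(lines)
-- ===== SOURCE B (Python) =====
-- def _clean_line(line):
--     if line.strip().startswith('#'):
--         line = line.lstrip('#').strip()
--     line = ''.join(c for c in line if c not in '*_`')
--     if line.strip() and line[0].isdigit() and '. ' in line:
--         line = line.replace('. ', ') ', 1)
--     return line
--
--
-- def _remove_markdown(text):
--     return '\n'.join(_clean_line(line) for line in text.split('\n'))
-- ===== Notes on version B (the rewrite author's own statement) =====
-- stated objective: simpler
-- what changed: A's three stages (header-strip loop, five whole-text replace passes, numbered-list loop) are fused into a single per-line pass in which the chain of double/single asterisk, double/single underscore and backtick replaces is collapsed to one character filter deleting asterisk, underscore and backtick characters.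
import Mathlib
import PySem

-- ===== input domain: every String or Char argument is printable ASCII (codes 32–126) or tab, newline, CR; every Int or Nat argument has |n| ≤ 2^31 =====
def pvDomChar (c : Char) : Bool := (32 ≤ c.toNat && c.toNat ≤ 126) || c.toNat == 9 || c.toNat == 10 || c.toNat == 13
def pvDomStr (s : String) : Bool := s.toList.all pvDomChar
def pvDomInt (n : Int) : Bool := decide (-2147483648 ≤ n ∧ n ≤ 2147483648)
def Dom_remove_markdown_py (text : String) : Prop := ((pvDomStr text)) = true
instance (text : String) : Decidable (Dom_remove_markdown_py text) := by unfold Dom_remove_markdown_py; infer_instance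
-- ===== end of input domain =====

-- B fuses A's three stages (header loop, five whole-text replaces, numbered-list loop) into one
-- per-line pass that deletes the characters '*', '_', '`' with a single filter; same return value.

-- ===== PORT A =====
-- hand port of s.replace(old, new, 1) (PySem has no count-limited replace): splice the
-- replacement in at the first occurrence of old; exact for old ≠ '' (here old = '. ')
def pvReplaceFirst (s old new : List Char) : List Char :=
  let f := PySem.Chars.find s old
  if 0 ≤ f then s.take f.toNat ++ new ++ s.drop (f.toNat + old.length) else s

-- line.lstrip('#').strip(): lstrip with the 1-char set '#' is dropWhile (· == '#'), exact
def pvHeaderStep (line : List Char) : List Char :=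
  if PySem.Chars.startswith (PySem.Chars.strip line) ['#'] then
    PySem.Chars.strip (line.dropWhile (fun c => c == '#'))
  else line

-- "if line.strip() and line[0].isdigit() and '. ' in line: line = line.replace('. ', ') ', 1)"
-- line[0] is guarded by the non-empty strip() check, so pyGet?'s none branch is unreachable
def pvNumStep (line : List Char) : List Char :=
  if !(PySem.Chars.strip line).isEmpty
      && (PySem.List.pyGet? line 0).elim false PySem.Chars.isdigit
      && PySem.Chars.isIn ['.', ' '] line then
    pvReplaceFirst line ['.', ' '] [')', ' ']
  else line

def remove_markdown_py (text : String) : String :=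
  let lines1 := (PySem.Chars.splitOn text.toList ['\n']).map pvHeaderStep
  let t1 := PySem.Chars.join ['\n'] lines1
  let t2 := PySem.Chars.replace (PySem.Chars.replace t1 ['*', '*'] []) ['*'] []
  let t3 := PySem.Chars.replace (PySem.Chars.replace t2 ['_', '_'] []) ['_'] []
  let t4 := PySem.Chars.replace t3 ['`'] []
  String.ofList (PySem.Chars.join ['\n'] ((PySem.Chars.splitOn t4 ['\n']).map pvNumStep))

-- ===== PORT B =====
-- Source B's _clean_line: header strip, then the genexp-join character filter, then the numbered fix
def pvCleanLine (line : List Char) : List Char :=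
  let line1 := if PySem.Chars.startswith (PySem.Chars.strip line) ['#'] then
      PySem.Chars.strip (line.dropWhile (fun c => c == '#'))
    else line
  let line2 := line1.filter (fun c => !(['*', '_', '`'].contains c))
  if !(PySem.Chars.strip line2).isEmpty
      && (PySem.List.pyGet? line2 0).elim false PySem.Chars.isdigit
      && PySem.Chars.isIn ['.', ' '] line2 then
    pvReplaceFirst line2 ['.', ' '] [')', ' ']
  else line2

def remove_markdown_py_alt (text : String) : String :=
  String.ofList (PySem.Chars.join ['\n'] ((PySem.Chars.splitOn text.toList ['\n']).map pvCleanLine))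

-- ===== PRECONDITION & SPEC =====
def Spec_remove_markdown_py (text : String) (out : String) : Prop := out = remove_markdown_py_alt text
instance (text : String) (out : String) : Decidable (Spec_remove_markdown_py text out) := by unfold Spec_remove_markdown_py; infer_instance

-- ===== CLAIM (what is proved, stated in full; the proofs are below) =====
def Claim_equal_remove_markdown_py : Prop := ∀ (text : String), Dom_remove_markdown_py text → Spec_remove_markdown_py text (remove_markdown_py text)

-- ===== LEMMAS AND PROOFS =====

-- reference splitter: split on the single character b
def pvSplitChar (b : Char) : List Char → List (List Char)
  | [] => [[]]
  | c :: t =>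
      if c = b then [] :: pvSplitChar b t
      else (c :: (pvSplitChar b t).headD []) :: (pvSplitChar b t).tail

theorem pv_go_del (b : Char) : ∀ (fuel : Nat) (l acc : List Char), l.length ≤ fuel →
    PySem.Chars.replace.go [b] [] fuel l acc = acc.reverse ++ l.filter (fun c => !(c == b)) := by
  intro fuel
  induction fuel with
  | zero =>
      intro l acc h
      have : l = [] := by cases l <;> simp_all
      subst this; simp [PySem.Chars.replace.go]
  | succ n ih =>
      intro l acc h
      cases l with
      | nil => simp [PySem.Chars.replace.go]
      | cons c t =>
          simp only [PySem.Chars.replace.go]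
          by_cases hc : c = b
          · subst hc
            simp [List.isPrefixOf, ih t acc (by simpa using h)]
          · simp [List.isPrefixOf, Ne.symm hc, hc, ih t (c :: acc) (by simpa using h)]

theorem pv_replace_del (b : Char) (s : List Char) :
    PySem.Chars.replace s [b] [] = s.filter (fun c => !(c == b)) := by
  simp [PySem.Chars.replace, pv_go_del b s.length s [] le_rfl]

theorem pv_go_pair (b : Char) (q : Char → Bool) (hq : q b = false) :
    ∀ (fuel : Nat) (l acc : List Char), l.length ≤ fuel →
    (PySem.Chars.replace.go [b, b] [] fuel l acc).filter q = (acc.reverse ++ l).filter q := by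
  intro fuel
  induction fuel with
  | zero =>
      intro l acc h
      have : l = [] := by cases l <;> simp_all
      subst this; simp [PySem.Chars.replace.go]
  | succ n ih =>
      intro l acc h
      cases l with
      | nil => simp [PySem.Chars.replace.go]
      | cons c t =>
          simp only [PySem.Chars.replace.go]
          by_cases hp : List.isPrefixOf [b, b] (c :: t)
          · rw [if_pos hp]
            rcases t with _ | ⟨c2, t2⟩
            · simp [List.isPrefixOf] at hp
            · obtain ⟨rfl, rfl⟩ : b = c ∧ b = c2 := by
                simpa [List.isPrefixOf] using hp
              simp only [List.length_cons, List.length_nil, List.drop_succ_cons,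
                List.drop_zero, List.reverse_nil, List.nil_append]
              rw [ih t2 acc (by simp at h; omega)]
              simp [List.filter_append, hq]
          · rw [if_neg hp, ih t (c :: acc) (by simpa using h)]
            simp [List.filter_append, List.filter_cons]

theorem pv_replace_pair (b : Char) (q : Char → Bool) (hq : q b = false) (s : List Char) :
    (PySem.Chars.replace s [b, b] []).filter q = s.filter q := by
  simp [PySem.Chars.replace, pv_go_pair b q hq s.length s [] le_rfl]

theorem pv_splitChar_ne_nil (b : Char) (s : List Char) : pvSplitChar b s ≠ [] := by
  cases s with
  | nil => simp [pvSplitChar]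
  | cons c t => by_cases h : c = b <;> simp [pvSplitChar, h]

theorem pv_cons_headD_tail (l : List (List Char)) (h : l ≠ []) :
    l.head?.getD [] :: l.tail = l := by cases l <;> simp_all

theorem pv_go_split (b : Char) : ∀ (fuel : Nat) (l cur : List Char) (acc : List (List Char)), l.length ≤ fuel →
    PySem.Chars.splitOn.go [b] fuel l cur acc =
      acc.reverse ++ (cur.reverse ++ (pvSplitChar b l).headD []) :: (pvSplitChar b l).tail := by
  intro fuel
  induction fuel with
  | zero =>
      intro l cur acc h
      have : l = [] := by cases l <;> simp_all
      subst this; simp [PySem.Chars.splitOn.go, pvSplitChar]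
  | succ n ih =>
      intro l cur acc h
      cases l with
      | nil => simp [PySem.Chars.splitOn.go, pvSplitChar]
      | cons c t =>
          simp only [PySem.Chars.splitOn.go]
          by_cases hc : c = b
          · subst hc
            rw [if_pos (by simp [List.isPrefixOf])]
            simp only [List.length_cons, List.length_nil, List.drop_succ_cons, List.drop_zero]
            rw [ih t [] (cur.reverse :: acc) (by simpa using h)]
            simp [pvSplitChar]
            exact pv_cons_headD_tail _ (pv_splitChar_ne_nil c t)
          · rw [if_neg (by simp [List.isPrefixOf, Ne.symm hc])]
            rw [ih t (c :: cur) acc (by simpa using h)]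
            rcases hne : pvSplitChar b t with _ | ⟨x, xs⟩
            · exact absurd hne (pv_splitChar_ne_nil b t)
            · simp [pvSplitChar, hc, hne]

theorem pv_splitOn_eq (b : Char) (s : List Char) :
    PySem.Chars.splitOn s [b] = pvSplitChar b s := by
  rw [PySem.Chars.splitOn, pv_go_split b (s.length + 1) s [] [] (by omega)]
  rcases hne : pvSplitChar b s with _ | ⟨x, xs⟩
  · exact absurd hne (pv_splitChar_ne_nil b s)
  · simp

theorem pv_join_cons_cons (b : Char) (x y : List Char) (xs : List (List Char)) :
    PySem.Chars.join [b] (x :: y :: xs) = x ++ b :: PySem.Chars.join [b] (y :: xs) := by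
  simp [PySem.Chars.join, List.intercalate]

theorem pv_join_singleton' (b : Char) (x : List Char) : PySem.Chars.join [b] [x] = x := by
  simp [PySem.Chars.join, List.intercalate]

theorem pv_splitChar_no_b (b : Char) (s : List Char) : ∀ l ∈ pvSplitChar b s, b ∉ l := by
  induction s with
  | nil => simp [pvSplitChar]
  | cons c t ih =>
      by_cases hc : c = b
      · subst hc; simpa [pvSplitChar] using ih
      · rcases hne : pvSplitChar b t with _ | ⟨x, xs⟩
        · exact absurd hne (pv_splitChar_ne_nil b t)
        · rw [hne] at ih
          simp only [pvSplitChar, hc, if_false, hne, List.headD_cons, List.tail_cons]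
          intro l hl
          rcases List.mem_cons.mp hl with rfl | hl
          · intro hm
            rcases List.mem_cons.mp hm with hm | hm
            · exact hc hm.symm
            · exact ih x (List.mem_cons_self ..) hm
          · exact ih l (List.mem_cons_of_mem _ hl)

theorem pv_splitChar_of_not_mem (b : Char) (l : List Char) (h : b ∉ l) :
    pvSplitChar b l = [l] := by
  induction l with
  | nil => simp [pvSplitChar]
  | cons c t ih =>
      have hc : ¬ c = b := fun hh => h (by simp [hh])
      simp [pvSplitChar, hc, ih (fun hh => h (by simp [hh]))]

theorem pv_splitChar_append (b : Char) (l r : List Char) (h : b ∉ l) :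
    pvSplitChar b (l ++ b :: r) = l :: pvSplitChar b r := by
  induction l with
  | nil => simp [pvSplitChar]
  | cons c t ih =>
      have hc : ¬ c = b := fun hh => h (by simp [hh])
      rw [List.cons_append]
      simp only [pvSplitChar, hc, if_false, ih (fun hh => h (by simp [hh]))]
      simp

theorem pv_join_inv (b : Char) : ∀ (ls : List (List Char)), ls ≠ [] → (∀ l ∈ ls, b ∉ l) →
    pvSplitChar b (PySem.Chars.join [b] ls) = ls := by
  intro ls
  induction ls with
  | nil => simp
  | cons x xs ih =>
      intro _ hfree
      cases xs with
      | nil =>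
          rw [pv_join_singleton']
          exact pv_splitChar_of_not_mem b x (hfree x (by simp))
      | cons y ys =>
          rw [pv_join_cons_cons]
          rw [pv_splitChar_append b x _ (hfree x (by simp))]
          rw [ih (by simp) (fun l hl => hfree l (by simp [hl]))]

theorem pv_filter_join (b : Char) (q : Char → Bool) (hq : q b = true) :
    ∀ (ls : List (List Char)),
      (PySem.Chars.join [b] ls).filter q = PySem.Chars.join [b] (ls.map (List.filter q)) := by
  intro ls
  induction ls with
  | nil => simp [PySem.Chars.join, List.intercalate]
  | cons x xs ih =>
      cases xs with
      | nil => simp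
      | cons y ys =>
          rw [pv_join_cons_cons, List.filter_append, List.filter_cons]
          simp only [hq, if_pos, ih, List.map_cons]
          rw [pv_join_cons_cons]

theorem pv_strip_sublist (l : List Char) : (PySem.Chars.strip l).Sublist l := by
  refine List.Sublist.trans ?_ (List.dropWhile_sublist (p := PySem.Chars.isspace) (l := l))
  simp only [PySem.Chars.strip, PySem.Chars.rstrip, PySem.Chars.lstrip]
  exact (List.reverse_sublist.mpr (List.dropWhile_sublist _)).trans (by simp)

theorem pv_headerStep_no_b (b : Char) (l : List Char) (h : b ∉ l) : b ∉ pvHeaderStep l := by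
  unfold pvHeaderStep
  split
  · intro hmem
    exact h (List.Sublist.mem ((pv_strip_sublist _).mem hmem) (List.dropWhile_sublist _))
  · exact h

-- A's replace chain deletes exactly the characters '*', '_', '`'
theorem pv_chain_eq_filter (t : List Char) :
    PySem.Chars.replace
        (PySem.Chars.replace
          (PySem.Chars.replace (PySem.Chars.replace (PySem.Chars.replace t ['*', '*'] []) ['*'] [])
            ['_', '_'] []) ['_'] []) ['`'] []
      = t.filter (fun c => !(['*', '_', '`'].contains c)) := by
  rw [pv_replace_del, pv_replace_del, pv_replace_del]
  rw [pv_replace_pair '_' _ (by decide)]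
  rw [List.filter_filter, List.filter_filter]
  rw [pv_replace_pair '*' _ (by decide)]
  refine List.filter_congr ?_
  intro c _
  cases h1 : c == '*' <;> cases h2 : c == '_' <;> cases h3 : c == '`' <;>
    simp_all

theorem pv_cleanLine_eq (l : List Char) :
    pvCleanLine l = pvNumStep ((pvHeaderStep l).filter (fun c => !(['*', '_', '`'].contains c))) :=
  rfl

-- ===== VERDICT (by name: the statement is the Claim_ definition above) =====
theorem remove_markdown_py_spec : Claim_equal_remove_markdown_py := by
  intro text _
  unfold Spec_remove_markdown_py remove_markdown_py remove_markdown_py_alt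
  dsimp only
  refine congrArg String.ofList ?_
  rw [pv_chain_eq_filter, pv_splitOn_eq, pv_splitOn_eq]
  rw [pv_filter_join '\n' _ (by decide)]
  rw [pv_join_inv '\n' _ (by simp [pv_splitChar_ne_nil]) ?free]
  case free =>
    intro l hl
    simp only [List.map_map, List.mem_map] at hl
    obtain ⟨l0, hl0, rfl⟩ := hl
    intro hmem
    exact pv_headerStep_no_b '\n' l0 (pv_splitChar_no_b '\n' text.toList l0 hl0)
      (List.mem_of_mem_filter hmem)
  simp only [List.map_map]
  refine congrArg _ (List.map_congr_left ?_)
  intro l _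
  rw [pv_cleanLine_eq]
  rfl
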